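-- pv_equiv track=rewrite | github.com/karthik7133/python | practise/week5.py | find_total_xp
-- ===== SOURCE A (Python) =====
-- class SegmentTree:
--     def __init__(self, data):
--         self.n = len(data)
--         self.tree = [0] * (2 * self.n)
--         self.build(data)
--
--     def build(self, data):
--         for i in range(self.n):
--             self.tree[self.n + i] = data[i]
--         for i in range(self.n - 1, 0, -1):
--             self.tree[i] = max(self.tree[2 * i], self.tree[2 * i + 1])
--
--     def query(self, left, right):
--         left += self.n
--         right += self.n
--         max_value = 0
--         while left < right:
--             if left % 2:
--                 max_value = max(max_value, self.tree[left])
--                 left += 1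
--             if right % 2:
--                 right -= 1
--                 max_value = max(max_value, self.tree[right])
--             left //= 2
--             right //= 2
--         return max_value
--
-- def find_total_xp(N, A, Bonus):
--     # Step 1: Build the Segment Tree for Bonus
--     seg_tree = SegmentTree(Bonus)
--
--     total_xp = 0
--
--     # Step 2: Find the first player R on the right for each player i
--     for i in range(N):
--         power_i = A[i]
--         R = -1
--         for j in range(i + 1, N):
--             if A[j] % power_i == 0:
--                 R = j
--                 break
--         if R != -1:
--             # Step 3: Query the maximum bonus in the range [i, R]
--             max_bonus = seg_tree.query(i, R + 1)
--             total_xp += max_bonus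
--
--     return total_xp
-- ===== SOURCE B (Python) =====
-- def find_total_xp(N, A, Bonus):
--     # Same outermost scan, but no SegmentTree: the range maximum is taken
--     # directly from the bonus slice (floored at 0, as the tree query's seed does).
--     total_xp = 0
--     for i in range(N):
--         R = next((j for j in range(i + 1, N) if A[j] % A[i] == 0), None)
--         if R is not None:
--             total_xp += max(0, max(Bonus[i:R + 1]))
--     return total_xp
-- ===== Notes on version B (the rewrite author's own statement) =====
-- stated objective: simpler
-- what changed: Removed the SegmentTree class entirely (build loops and the bottom-up log-query while loop are gone): B finds the same first right divisible index and adds max(0, max(Bonus[i:R+1])) computed directly on the slice, reproducing the query's 0 seed.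
-- outside the precondition, e.g. on find_total_xp(5, [-4, 4, 1, 4, -2, -1, 1], [6, 6]): A returns 18, B raises ValueError; on find_total_xp(2, [2, 1, 2], []): A returns 0, B returns 0
import Mathlib
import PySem

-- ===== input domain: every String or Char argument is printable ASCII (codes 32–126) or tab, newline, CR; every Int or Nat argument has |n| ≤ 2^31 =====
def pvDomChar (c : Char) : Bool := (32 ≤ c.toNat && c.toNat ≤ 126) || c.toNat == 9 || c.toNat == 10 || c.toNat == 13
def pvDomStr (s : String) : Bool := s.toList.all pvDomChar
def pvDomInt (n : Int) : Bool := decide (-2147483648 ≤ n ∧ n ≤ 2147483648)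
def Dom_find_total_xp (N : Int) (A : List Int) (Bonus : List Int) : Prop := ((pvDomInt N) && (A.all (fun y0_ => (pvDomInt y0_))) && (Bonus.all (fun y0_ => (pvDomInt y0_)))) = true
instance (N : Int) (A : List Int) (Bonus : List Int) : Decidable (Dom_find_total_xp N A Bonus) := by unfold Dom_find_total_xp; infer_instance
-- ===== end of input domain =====

-- B drops the SegmentTree entirely and takes each range maximum straight from the bonus
-- slice (floored at 0, matching the tree query's 0 seed); objective: simpler, same O(N^2) cost.

-- ===== PORT A =====
-- list reads (tree[...], data[i], A[i]): always in range under Pre_; the .getD 0 default is never read there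

def pvTreeGet (tree : List Int) (i : Int) : Int := (PySem.List.pyGet? tree i).getD 0

-- SegmentTree.__init__ + SegmentTree.build
def pvSegBuild (n : Nat) (data : List Int) : List Int :=
  let tree0 := List.replicate (2 * n) 0
  let tree1 := (List.range n).foldl (fun t i => t.set (n + i) (data.getD i 0)) tree0
  (PySem.List.pyRange ((n : Int) - 1) 0 (-1)).foldl
    (fun t i => t.set i.toNat (max (pvTreeGet t (2 * i)) (pvTreeGet t (2 * i + 1)))) tree1

-- SegmentTree.query's while loop, with fuel (right strictly decreases each iteration)
def pvSegQuery (tree : List Int) : Nat → Int → Int → Int → Int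
  | 0, _, _, mv => mv
  | fuel + 1, left, right, mv =>
    if left < right then
      let mv1 := if PySem.Int.mod left 2 ≠ 0 then max mv (pvTreeGet tree left) else mv
      let left1 := if PySem.Int.mod left 2 ≠ 0 then left + 1 else left
      let right1 := if PySem.Int.mod right 2 ≠ 0 then right - 1 else right
      let mv2 := if PySem.Int.mod right 2 ≠ 0 then max mv1 (pvTreeGet tree right1) else mv1
      pvSegQuery tree fuel (PySem.Int.floordiv left1 2) (PySem.Int.floordiv right1 2) mv2
    else mv

-- the inner loop: for j in range(i+1, N): if A[j] % power_i == 0: R = j; break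
def pvFindR (A : List Int) (p : Int) : List Int → Int
  | [] => -1
  | j :: js =>
    if PySem.Int.mod ((PySem.List.pyGet? A j).getD 0) p == 0 then j else pvFindR A p js

def find_total_xp (N : Int) (A : List Int) (Bonus : List Int) : Int :=
  let n := Bonus.length
  let tree := pvSegBuild n Bonus
  (PySem.List.pyRange 0 N).foldl (fun total_xp i =>
    let power_i := (PySem.List.pyGet? A i).getD 0
    let R := pvFindR A power_i (PySem.List.pyRange (i + 1) N)
    if R ≠ -1 then
      total_xp + pvSegQuery tree ((R + 1 + (n : Int)).toNat + 1) (i + (n : Int)) (R + 1 + (n : Int)) 0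
    else total_xp) 0

-- ===== PORT B =====
-- max(l); only ever evaluated on a non-empty slice under Pre_
def pvMaxOr0 (l : List Int) : Int := (PySem.List.max? l (fun y => y)).getD 0

def find_total_xp_alt (N : Int) (A : List Int) (Bonus : List Int) : Int :=
  (PySem.List.pyRange 0 N).foldl (fun total_xp i =>
    match (PySem.List.pyRange (i + 1) N).find? (fun j =>
        PySem.Int.mod ((PySem.List.pyGet? A j).getD 0) ((PySem.List.pyGet? A i).getD 0) == 0) with
    | some R => total_xp + max 0 (pvMaxOr0 (PySem.List.slice Bonus (some i) (some (R + 1))))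
    | none => total_xp) 0

-- ===== PRECONDITION & SPEC =====
-- Pre_ excludes exactly A's crashes plus one returning corner: N > len(A) (IndexError at A[i]),
-- a zero among A[0..N-2] (ZeroDivisionError in the inner loop), and N > len(Bonus), where the tree
-- query indexes the too-small tree out of range — except when no divisible pair ever needs a query
-- or the partial tree happens to cover the range, where A still returns a value of that accidental tree.
def Pre_find_total_xp (N : Int) (A : List Int) (Bonus : List Int) : Prop :=
  N ≤ (A.length : Int) ∧ N ≤ (Bonus.length : Int) ∧ ∀ x ∈ A.take (N - 1).toNat, x ≠ 0
instance (N : Int) (A : List Int) (Bonus : List Int) : Decidable (Pre_find_total_xp N A Bonus) := by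
  unfold Pre_find_total_xp; infer_instance

def pvWitness_find_total_xp : Int × List Int × List Int := (2, [1, 2], [3, 4])

def Spec_find_total_xp (N : Int) (A : List Int) (Bonus : List Int) (out : Int) : Prop := out = find_total_xp_alt N A Bonus
instance (N : Int) (A : List Int) (Bonus : List Int) (out : Int) : Decidable (Spec_find_total_xp N A Bonus out) := by unfold Spec_find_total_xp; infer_instance

-- ===== CLAIM (what is proved, stated in full; the proofs are below) =====
def Claim_equal_find_total_xp : Prop := ∀ (N : Int) (A : List Int) (Bonus : List Int), Dom_find_total_xp N A Bonus → Pre_find_total_xp N A Bonus → Spec_find_total_xp N A Bonus (find_total_xp N A Bonus)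

-- ===== LEMMAS AND PROOFS =====

theorem pvTreeGet_natCast (t : List Int) (k : Nat) : pvTreeGet t (k : Int) = t.getD k 0 := by
  simp only [pvTreeGet, PySem.List.pyGet?, PySem.List.pyIdx?, List.getD]
  split
  · split
    · simp
    · rename_i h
      simp [List.getElem?_eq_none (by omega : t.length ≤ k)]
  · simp at *

theorem pvGetDSet (l : List Int) (i : Nat) (a : Int) (j : Nat) : (l.set i a).getD j 0 = if i = j ∧ i < l.length then a else l.getD j 0 := by
  simp only [List.getD, List.getElem?_set]
  split
  · rename_i h
    subst h
    by_cases hl : i < l.length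
    · simp [hl]
    · simp [hl]
  · rename_i h
    simp [h]

theorem pvDown (m : Nat) : PySem.List.pyRange ((m : Int)) 0 (-1) = (List.range m).map (fun k : Nat => (m : Int) - (k : Int)) := by
  simp only [PySem.List.pyRange]
  rw [if_neg (by decide : ¬ ((-1:Int) = 0)), if_neg (by decide : ¬ ((0:Int) < -1))]
  by_cases hm : (0:Int) < (m:Int)
  · rw [if_pos hm]
    rw [show (((m:Int) - 0 + -(-1) - 1) / -(-1)).toNat = m by norm_num]
    apply List.map_congr_left
    intro k _
    ring
  · rw [if_neg hm]
    have : m = 0 := by omega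
    simp [this]

theorem pvDownCons (m : Nat) : PySem.List.pyRange (((m+1 : Nat) : Int)) 0 (-1) = ((m+1 : Nat) : Int) :: PySem.List.pyRange ((m : Int)) 0 (-1) := by
  rw [pvDown, pvDown, List.range_succ_eq_map]
  simp only [List.map_cons, List.map_map, Nat.cast_zero, sub_zero, Nat.cast_add, Nat.cast_one]
  congr 1
  apply List.map_congr_left
  intro k _
  simp only [Function.comp_apply, Nat.succ_eq_add_one]
  push_cast
  ring

theorem pvLeafFold_length (n : Nat) (data : List Int) (L : List Nat) : ∀ t : List Int,
    (L.foldl (fun t i => t.set (n + i) (data.getD i 0)) t).length = t.length := by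
  induction L with
  | nil => intro t; rfl
  | cons x xs ih => intro t; rw [List.foldl_cons, ih, List.length_set]

theorem pvLeafFold_val (n : Nat) (data : List Int) : ∀ (m : Nat) (t : List Int) (j : Nat),
    ((List.range m).foldl (fun t i => t.set (n + i) (data.getD i 0)) t).getD j 0 =
      if n ≤ j ∧ j < n + m ∧ j < t.length then data.getD (j - n) 0 else t.getD j 0 := by
  intro m
  induction m with
  | zero => intro t j; simp; intro h1 h2 h3; omega
  | succ m ih =>
    intro t j
    rw [List.range_succ, List.foldl_append, List.foldl_cons, List.foldl_nil, pvGetDSet,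
      pvLeafFold_length, ih]
    by_cases hj : n + m = j
    · subst hj
      simp only [if_neg (by omega : ¬ (n ≤ n + m ∧ n + m < n + m ∧ n + m < t.length))]
      by_cases hl : n + m < t.length
      · rw [if_pos (And.intro trivial hl : True ∧ n + m < t.length),
          if_pos (show n ≤ n + m ∧ n + m < n + (m+1) ∧ n + m < t.length from by omega),
          show n + m - n = m from by omega]
      · rw [if_neg (by omega), if_neg (by omega)]
    · by_cases hin : n ≤ j ∧ j < n + m ∧ j < t.length
      · rw [if_neg (by omega), if_pos hin, if_pos (by omega)]
      · rw [if_neg (by omega), if_neg hin, if_neg (by omega)]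

-- the tail of build: process nodes m, m-1, ..., 1

theorem pvIntFold (n : Nat) (data : List Int) : ∀ (m : Nat) (t : List Int),
    t.length = 2 * n → m < n →
    (((PySem.List.pyRange ((m:Nat) : Int) 0 (-1)).foldl
        (fun t i => t.set i.toNat (max (pvTreeGet t (2 * i)) (pvTreeGet t (2 * i + 1)))) t).length = 2 * n)
    ∧ (∀ j : Nat, (j = 0 ∨ m < j) →
        ((PySem.List.pyRange ((m:Nat) : Int) 0 (-1)).foldl
        (fun t i => t.set i.toNat (max (pvTreeGet t (2 * i)) (pvTreeGet t (2 * i + 1)))) t).getD j 0 = t.getD j 0)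
    ∧ (∀ j : Nat, 1 ≤ j → j ≤ m →
        ((PySem.List.pyRange ((m:Nat) : Int) 0 (-1)).foldl
        (fun t i => t.set i.toNat (max (pvTreeGet t (2 * i)) (pvTreeGet t (2 * i + 1)))) t).getD j 0 =
        max (((PySem.List.pyRange ((m:Nat) : Int) 0 (-1)).foldl
        (fun t i => t.set i.toNat (max (pvTreeGet t (2 * i)) (pvTreeGet t (2 * i + 1)))) t).getD (2*j) 0)
            (((PySem.List.pyRange ((m:Nat) : Int) 0 (-1)).foldl
        (fun t i => t.set i.toNat (max (pvTreeGet t (2 * i)) (pvTreeGet t (2 * i + 1)))) t).getD (2*j+1) 0)) := by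
  intro m
  induction m with
  | zero =>
    intro t ht hn
    have e : PySem.List.pyRange ((0:Nat):Int) 0 (-1) = [] := by rw [pvDown]; simp
    rw [e, List.foldl_nil]
    exact ⟨ht, fun j _ => rfl, fun j h1 h2 => by omega⟩
  | succ m ih =>
    intro t ht hn
    rw [pvDownCons, List.foldl_cons]
    have e1 : (2 : Int) * ((m+1 : Nat) : Int) = ((2*(m+1) : Nat) : Int) := by push_cast; ring
    have e2 : ((2*(m+1) : Nat) : Int) + 1 = ((2*(m+1)+1 : Nat) : Int) := by push_cast; ring
    rw [e1, e2, pvTreeGet_natCast, pvTreeGet_natCast,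
      show ((m+1 : Nat) : Int).toNat = m + 1 by omega]
    set v := max (t.getD (2*(m+1)) 0) (t.getD (2*(m+1)+1) 0) with hv
    set t' := t.set (m+1) v with ht'
    have ht'l : t'.length = 2 * n := by rw [ht', List.length_set, ht]
    obtain ⟨ihl, ihu, ihn⟩ := ih t' ht'l (by omega)
    refine ⟨ihl, ?_, ?_⟩
    · intro j hj
      rw [ihu j (by omega), ht', pvGetDSet, if_neg (by omega)]
    · intro j h1 h2
      by_cases hjm : j ≤ m
      · exact ihn j h1 hjm
      · have hj : j = m + 1 := by omega
        subst hj
        rw [ihu (2*(m+1)) (by omega), ihu (2*(m+1)+1) (by omega),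
          ihu (m+1) (by omega)]
        rw [ht', pvGetDSet, pvGetDSet, pvGetDSet,
          if_pos (And.intro rfl (show m + 1 < t.length by omega)),
          if_neg (show ¬ (m + 1 = 2*(m+1) ∧ m + 1 < t.length) by omega),
          if_neg (show ¬ (m + 1 = 2*(m+1)+1 ∧ m + 1 < t.length) by omega)]

theorem pv_segBuild_leaf (n : Nat) (data : List Int) (k : Nat) (h1 : n ≤ k) (h2 : k < 2 * n) :
    (pvSegBuild n data).getD k 0 = data.getD (k - n) 0 := by
  rcases n with _ | m
  · omega
  · simp only [pvSegBuild]
    rw [show (((m+1:Nat)) : Int) - 1 = ((m:Nat):Int) from by push_cast; ring]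
    have hlen : ((List.range (m+1)).foldl
        (fun t i => t.set ((m+1) + i) (data.getD i 0)) (List.replicate (2*(m+1)) 0)).length = 2*(m+1) := by
      rw [pvLeafFold_length, List.length_replicate]
    rw [(pvIntFold (m+1) data m _ hlen (by omega)).2.1 k (by omega), pvLeafFold_val,
      if_pos (by simp only [List.length_replicate]; omega :
        (m+1) ≤ k ∧ k < (m+1) + (m+1) ∧ k < (List.replicate (2*(m+1)) (0:Int)).length)]

theorem pv_segBuild_node (n : Nat) (data : List Int) (k : Nat) (h1 : 1 ≤ k) (h2 : k < n) :
    (pvSegBuild n data).getD k 0 =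
      max ((pvSegBuild n data).getD (2 * k) 0) ((pvSegBuild n data).getD (2 * k + 1) 0) := by
  rcases n with _ | m
  · omega
  · simp only [pvSegBuild]
    rw [show (((m+1:Nat)) : Int) - 1 = ((m:Nat):Int) from by push_cast; ring]
    exact (pvIntFold (m+1) data m _
      (by rw [pvLeafFold_length, List.length_replicate]) (by omega)).2.2 k h1 (by omega)

def pvCover (n : Nat) (k : Nat) : List Nat :=
  if n ≤ k then [k - n]
  else if k = 0 then []
  else pvCover n (2 * k) ++ pvCover n (2 * k + 1)
termination_by 2 * n - k
decreasing_by all_goals omega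

theorem pv_foldl_max_init (g : Nat → Int) (t : List Nat) : ∀ (a b : Int),
    t.foldl (fun x j => max x (g j)) (max a b) = max a (t.foldl (fun x j => max x (g j)) b) := by
  induction t with
  | nil => intro a b; simp
  | cons x xs ih => intro a b; simp only [List.foldl_cons, max_assoc]; exact ih a (max b (g x))

theorem pv_cover_fold_aux (n : Nat) (data : List Int) : ∀ (M k : Nat), 2 * n ≤ k + M → 1 ≤ k → k < 2 * n →
    ∀ acc : Int,
    (pvCover n k).foldl (fun a j => max a (data.getD j 0)) acc =
      max acc ((pvSegBuild n data).getD k 0) := by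
  intro M
  induction M with
  | zero => intro k hM h1 h2 acc; omega
  | succ M ih =>
    intro k hM h1 h2 acc
    by_cases hnk : n ≤ k
    · rw [pvCover, if_pos hnk]
      simp only [List.foldl_cons, List.foldl_nil]
      rw [pv_segBuild_leaf n data k hnk h2]
    · have hck : pvCover n k = pvCover n (2*k) ++ pvCover n (2*k+1) := by
        conv_lhs => rw [pvCover]
        rw [if_neg hnk, if_neg (by omega : ¬ k = 0)]
      rw [hck, List.foldl_append]
      have hk : k < n := by omega
      rw [ih (2*k) (by omega) (by omega) (by omega) acc,
          ih (2*k+1) (by omega) (by omega) (by omega) (max acc ((pvSegBuild n data).getD (2*k) 0)),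
          max_assoc, ← pv_segBuild_node n data k h1 hk]

theorem pv_cover_fold (n : Nat) (data : List Int) (k : Nat) (h1 : 1 ≤ k) (h2 : k < 2 * n)
    (acc : Int) :
    (pvCover n k).foldl (fun a j => max a (data.getD j 0)) acc =
      max acc ((pvSegBuild n data).getD k 0) :=
  pv_cover_fold_aux n data (2 * n) k (by omega) h1 h2 acc

theorem pv_cover_leaves (n : Nat) : ∀ (c l : Nat), n ≤ l →
    (List.range' l c).flatMap (pvCover n) = List.range' (l - n) c := by
  intro c
  induction c with
  | zero => intro l _; rfl
  | succ c ih =>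
    intro l hl
    rw [List.range'_succ, List.range'_succ, List.flatMap_cons, pvCover, if_pos hl, ih (l+1) (by omega),
      show l + 1 - n = l - n + 1 from by omega]
    rfl

theorem pv_cover_double (n : Nat) : ∀ (c k : Nat), 1 ≤ k → k + c ≤ n →
    (List.range' k c).flatMap (pvCover n) = (List.range' (2 * k) (2 * c)).flatMap (pvCover n) := by
  intro c
  induction c with
  | zero => intro k _ _; rfl
  | succ c ih =>
    intro k h1 h2
    rw [List.range'_succ, show 2 * (c + 1) = (2*c+1) + 1 from by ring, List.range'_succ,
      show 2*c+1 = 2*c + 1 from rfl, List.range'_succ]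
    rw [List.flatMap_cons, List.flatMap_cons, List.flatMap_cons]
    have hck : pvCover n k = pvCover n (2*k) ++ pvCover n (2*k+1) := by
      conv_lhs => rw [pvCover]
      rw [if_neg (show ¬ n ≤ k by omega), if_neg (show ¬ k = 0 by omega)]
    rw [hck]
    rw [List.append_assoc, ih (k+1) (by omega) (by omega),
      show 2 * (k+1) = 2*k + 1 + 1 from by ring]

theorem pv_mod2_cast (l : Nat) : PySem.Int.mod (l : Int) 2 = ((l % 2 : Nat) : Int) := by
  rw [PySem.Int.mod_eq_emod_of_pos (by norm_num)]
  omega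

theorem pv_query_step (tree : List Int) (fuel : Nat) (l r : Nat) (acc : Int) (hlr : l < r) :
    pvSegQuery tree (fuel+1) (l:Int) (r:Int) acc =
    pvSegQuery tree fuel
       (((if l % 2 = 1 then l+1 else l) / 2 : Nat) : Int)
       (((if r % 2 = 1 then r-1 else r) / 2 : Nat) : Int)
       (let acc1 := if l % 2 = 1 then max acc (tree.getD l 0) else acc
        if r % 2 = 1 then max acc1 (tree.getD (r-1) 0) else acc1) := by
  simp only [pvSegQuery]
  rw [if_pos (by exact_mod_cast hlr : (l:Int) < (r:Int))]
  rw [pv_mod2_cast l, pv_mod2_cast r]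
  by_cases hlp : l % 2 = 1 <;> by_cases hrp : r % 2 = 1
  · rw [hlp, hrp]
    norm_num
    rw [show (l:Int) + 1 = ((l+1 : Nat) : Int) from by push_cast; ring,
        show (r:Int) - 1 = ((r-1 : Nat) : Int) from by push_cast [Nat.cast_sub (by omega : 1 ≤ r)]; ring]
    simp [pvTreeGet_natCast, List.getD]
  · rw [hlp, show r % 2 = 0 from by omega]
    norm_num
    rw [show (l:Int) + 1 = ((l+1 : Nat) : Int) from by push_cast; ring]
    simp [pvTreeGet_natCast, List.getD]
  · rw [hrp, show l % 2 = 0 from by omega]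
    norm_num
    rw [show (r:Int) - 1 = ((r-1 : Nat) : Int) from by push_cast [Nat.cast_sub (by omega : 1 ≤ r)]; ring]
    simp [pvTreeGet_natCast, List.getD]
  · rw [show l % 2 = 0 from by omega, show r % 2 = 0 from by omega]
    norm_num

theorem pv_foldl_max_swap (g : Nat → Int) (t : List Nat) (a b : Int) :
    t.foldl (fun x j => max x (g j)) (max a b) = max (t.foldl (fun x j => max x (g j)) a) b := by
  rw [max_comm a b, pv_foldl_max_init, max_comm]

theorem pv_query_eq (n : Nat) (data : List Int) : ∀ (fuel : Nat) (l r : Nat) (acc : Int),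
    1 ≤ l → r ≤ 2 * n → r ≤ fuel →
    pvSegQuery (pvSegBuild n data) fuel (l : Int) (r : Int) acc =
      ((List.range' l (r - l)).flatMap (pvCover n)).foldl
        (fun a j => max a (data.getD j 0)) acc := by
  intro fuel
  induction fuel with
  | zero =>
    intro l r acc h1 h2 h3
    rw [show r = 0 from by omega, show (0:Nat) - l = 0 from by omega]
    rfl
  | succ fuel ih =>
    intro l r acc h1 h2 h3
    by_cases hlr : l < r
    · rw [pv_query_step (pvSegBuild n data) fuel l r acc hlr]
      by_cases hlp : l % 2 = 1 <;> by_cases hrp : r % 2 = 1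
      · -- l odd, r odd
        simp only [hlp, hrp, reduceIte]
        rw [ih ((l+1)/2) ((r-1)/2) _ (by omega) (by omega) (by omega)]
        have hd : (List.range' ((l+1)/2) ((r-1)/2 - (l+1)/2)).flatMap (pvCover n) =
            (List.range' (l+1) ((r-1) - (l+1))).flatMap (pvCover n) := by
          have h := pv_cover_double n (((r-1) - (l+1))/2) ((l+1)/2) (by omega) (by omega)
          rw [show 2 * ((l+1)/2) = l + 1 from by omega,
              show 2 * (((r-1) - (l+1))/2) = (r-1) - (l+1) from by omega,
              show (r-1)/2 - (l+1)/2 = ((r-1) - (l+1))/2 from by omega] at *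
          exact h
        rw [hd, show r - l = (((r-1) - (l+1)) + 1) + 1 from by omega, List.range'_succ,
          List.flatMap_cons, List.foldl_append,
          pv_cover_fold n data l (by omega) (by omega),
          List.range'_concat, show l + 1 + 1 * ((r-1) - (l+1)) = r - 1 from by omega,
          List.flatMap_append, List.foldl_append, List.flatMap_singleton,
          pv_cover_fold n data (r-1) (by omega) (by omega),
          pv_foldl_max_swap]
      · -- l odd, r even
        simp only [hlp, hrp, reduceIte]
        rw [ih ((l+1)/2) (r/2) _ (by omega) (by omega) (by omega)]
        have hd : (List.range' ((l+1)/2) (r/2 - (l+1)/2)).flatMap (pvCover n) =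
            (List.range' (l+1) (r - (l+1))).flatMap (pvCover n) := by
          have h := pv_cover_double n ((r - (l+1))/2) ((l+1)/2) (by omega) (by omega)
          rw [show 2 * ((l+1)/2) = l + 1 from by omega,
              show 2 * ((r - (l+1))/2) = r - (l+1) from by omega,
              show r/2 - (l+1)/2 = (r - (l+1))/2 from by omega] at *
          exact h
        rw [hd, show r - l = (r - (l+1)) + 1 from by omega, List.range'_succ,
          List.flatMap_cons, List.foldl_append,
          pv_cover_fold n data l (by omega) (by omega)]
      · -- l even, r odd
        simp only [hlp, hrp, reduceIte]
        rw [ih (l/2) ((r-1)/2) _ (by omega) (by omega) (by omega)]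
        have hd : (List.range' (l/2) ((r-1)/2 - l/2)).flatMap (pvCover n) =
            (List.range' l ((r-1) - l)).flatMap (pvCover n) := by
          have h := pv_cover_double n (((r-1) - l)/2) (l/2) (by omega) (by omega)
          rw [show 2 * (l/2) = l from by omega,
              show 2 * (((r-1) - l)/2) = (r-1) - l from by omega,
              show (r-1)/2 - l/2 = ((r-1) - l)/2 from by omega] at *
          exact h
        rw [hd, show r - l = ((r-1) - l) + 1 from by omega,
          List.range'_concat, show l + 1 * ((r-1) - l) = r - 1 from by omega,
          List.flatMap_append, List.foldl_append, List.flatMap_singleton,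
          pv_cover_fold n data (r-1) (by omega) (by omega),
          pv_foldl_max_swap]
      · -- l even, r even
        simp only [hlp, hrp, reduceIte]
        rw [ih (l/2) (r/2) _ (by omega) (by omega) (by omega)]
        have h := pv_cover_double n ((r - l)/2) (l/2) (by omega) (by omega)
        rw [show 2 * (l/2) = l from by omega,
            show 2 * ((r - l)/2) = r - l from by omega,
            show r/2 - l/2 = (r - l)/2 from by omega] at *
        rw [h]
    · have e : pvSegQuery (pvSegBuild n data) (fuel+1) (l:Int) (r:Int) acc = acc := by
        simp only [pvSegQuery]
        rw [if_neg (by exact_mod_cast hlr : ¬ ((l:Int) < (r:Int)))]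
      rw [e, show r - l = 0 from by omega]
      rfl

theorem pv_foldl_max_init_int (t : List Int) : ∀ (a b : Int),
    t.foldl max (max a b) = max a (t.foldl max b) := by
  induction t with
  | nil => intro a b; simp
  | cons x xs ih => intro a b; simp only [List.foldl_cons, max_assoc]; exact ih a (max b x)

theorem pv_take_drop_eq_map (data : List Int) : ∀ (c i : Nat), i + c ≤ data.length →
    (data.drop i).take c = (List.range' i c).map (fun k => data.getD k 0) := by
  intro c i hlen
  apply List.ext_getElem
  · simp only [List.length_take, List.length_drop, List.length_map, List.length_range']
    omega
  · intro j h1 h2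
    have hj : j < c := by simp only [List.length_take, List.length_drop] at h1; omega
    simp only [List.getElem_take, List.getElem_drop, List.getElem_map, List.getElem_range'_1]
    rw [List.getD_eq_getElem data 0 (by omega)]

theorem pv_max_slice (data : List Int) (i c : Nat) (hc : 1 ≤ c) (hlen : i + c ≤ data.length) :
    max 0 (pvMaxOr0 ((data.drop i).take c)) =
      (List.range' i c).foldl (fun a j => max a (data.getD j 0)) 0 := by
  rw [show (List.range' i c).foldl (fun a j => max a (data.getD j 0)) 0 =
      ((List.range' i c).map (fun k => data.getD k 0)).foldl max 0 from (List.foldl_map).symm]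
  rw [pv_take_drop_eq_map data c i hlen]
  rcases hcc : List.range' i c with _ | ⟨x, t⟩
  · exact absurd (List.range'_eq_nil_iff.mp hcc) (by omega)
  · rw [List.map_cons, pvMaxOr0, PySem.List.max?_id_cons]
    simp only [Option.getD_some]
    rw [List.foldl_cons, show max 0 (data.getD x 0) = max 0 (data.getD x 0) from rfl,
      pv_foldl_max_init_int]

theorem pv_findR_eq (A : List Int) (p : Int) (js : List Int) :
    pvFindR A p js =
      (js.find? (fun j => PySem.Int.mod ((PySem.List.pyGet? A j).getD 0) p == 0)).getD (-1) := by
  induction js with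
  | nil => rfl
  | cons j js ih =>
    simp only [pvFindR, List.find?_cons]
    rcases hb : (PySem.Int.mod ((PySem.List.pyGet? A j).getD 0) p == 0) with _ | _ <;>
      simp [ih]

theorem pv_main (N : Int) (A : List Int) (Bonus : List Int)
    (hB : N ≤ (Bonus.length : Int)) :
    find_total_xp N A Bonus = find_total_xp_alt N A Bonus := by
  unfold find_total_xp find_total_xp_alt
  apply PySem.List.foldl_congr_mem
  intro acc i hi
  obtain ⟨hi0, hiN⟩ := PySem.List.mem_pyRange_one.mp hi
  dsimp only
  rw [pv_findR_eq]
  rcases hfind : (PySem.List.pyRange (i + 1) N).find? (fun j =>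
      PySem.Int.mod ((PySem.List.pyGet? A j).getD 0) ((PySem.List.pyGet? A i).getD 0) == 0) with _ | R
  · simp only [Option.getD_none]
    rw [if_neg (by omega : ¬ (-1 : Int) ≠ -1)]
  · simp only [Option.getD_some]
    obtain ⟨hR1, hR2⟩ := PySem.List.mem_pyRange_one.mp (List.mem_of_find?_eq_some hfind)
    rw [if_pos (by omega : (R : Int) ≠ -1)]
    congr 1
    -- move to Nat indices
    set n := Bonus.length with hn
    obtain ⟨iN, rfl⟩ : ∃ iN : Nat, i = (iN : Int) := ⟨i.toNat, by omega⟩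
    obtain ⟨RN, rfl⟩ : ∃ RN : Nat, R = (RN : Int) := ⟨R.toNat, by omega⟩
    have hiR : iN < RN := by exact_mod_cast (by omega : (iN : Int) < RN)
    have hRn : RN + 1 ≤ n := by exact_mod_cast (by omega : (RN : Int) + 1 ≤ (n : Int))
    have e1 : (iN : Int) + (n : Int) = ((iN + n : Nat) : Int) := by push_cast; ring
    have e2 : (RN : Int) + 1 + (n : Int) = ((RN + 1 + n : Nat) : Int) := by push_cast; ring
    have e3 : (((RN + 1 + n : Nat) : Int)).toNat + 1 = (RN + 1 + n) + 1 := by omega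
    rw [e1, e2, e3,
      pv_query_eq n Bonus (RN + 1 + n + 1) (iN + n) (RN + 1 + n) 0 (by omega) (by omega) (by omega),
      show RN + 1 + n - (iN + n) = RN + 1 - iN from by omega,
      pv_cover_leaves n (RN + 1 - iN) (iN + n) (by omega),
      show iN + n - n = iN from by omega]
    rw [show (RN : Int) + 1 = ((RN + 1 : Nat) : Int) from by push_cast; ring,
      PySem.List.slice_natCast,
      pv_max_slice Bonus iN (RN + 1 - iN) (by omega) (by omega),
      show RN + 1 - iN = RN + 1 - iN from rfl]

-- ===== VERDICT (by name: the statement is the Claim_ definition above) =====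
theorem find_total_xp_spec : Claim_equal_find_total_xp := by
  intro N A Bonus _ hpre
  show find_total_xp N A Bonus = find_total_xp_alt N A Bonus
  exact pv_main N A Bonus hpre.2.1
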